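-- pv_equiv track=rewrite | github.com/3gpp-chatbox/p2_backend | src/retrieval/retrieve-section.py | filter_top_level_sections
-- ===== SOURCE A (Python) =====
-- from typing import List, Set
--
-- def is_descendant(section: str, potential_parent: str) -> bool:
--     """
--     Check if a section is a descendant of another section.
--
--     Args:
--         section (str): Section number to check (e.g., "3.2.1.4")
--         potential_parent (str): Potential parent section (e.g., "3.2.1")
--
--     Returns:
--         bool: True if section is a descendant of potential_parent
--     """
--     # Handle non-numeric section identifiers
--     if not section or not potential_parent:
--         return False
--
--     # Split sections into numeric parts
--     section_parts = section.split('.')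
--     parent_parts = potential_parent.split('.')
--
--     # Check if section is longer and starts with parent
--     if len(section_parts) <= len(parent_parts):
--         return False
--
--     return section.startswith(potential_parent + '.')
--
-- def filter_top_level_sections(sections: List[str]) -> List[str]:
--     """
--     Filter out descendant sections, keeping only top-level ones.
--
--     Args:
--         sections (List[str]): List of section numbers (e.g., ["3.2.1", "3.2.1.4", "3.2.1.2"])
--
--     Returns:
--         List[str]: List of top-level section numbers (e.g., ["3.2.1"])
--     """
--     top_level_sections = []
--
--     # Sort sections to ensure proper comparison
--     sorted_sections = sorted(sections)
--
--     for i, section in enumerate(sorted_sections):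
--         is_top_level = True
--
--         # Check if this section is a descendant of any previous section
--         for potential_parent in sorted_sections[:i]:
--             if is_descendant(section, potential_parent):
--                 is_top_level = False
--                 break
--
--         if is_top_level:
--             top_level_sections.append(section)
--
--     return top_level_sections
-- ===== SOURCE B (Python) =====
-- def filter_top_level_sections(sections):
--     """Keep only sections that have no ancestor present in the input.
--
--     Instead of comparing each section against every earlier one, build the set
--     of present sections once and, for each section, test whether any proper
--     dotted prefix (its ancestors) is present.
--     """
--     present = set(sections)
--     result = []
--     for section in sorted(sections):
--         has_parent = False
--         for i in range(1, len(section)):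
--             if section[i] == '.' and section[:i] in present:
--                 has_parent = True
--                 break
--         if not has_parent:
--             result.append(section)
--     return result
-- ===== Notes on version B (the rewrite author's own statement) =====
-- stated objective: faster
-- what changed: Instead of comparing each section against every earlier section of the sorted list, B builds a hash set of the input once and keeps a section iff none of its proper dotted prefixes (its possible ancestors) is in the set.
import Mathlib
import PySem

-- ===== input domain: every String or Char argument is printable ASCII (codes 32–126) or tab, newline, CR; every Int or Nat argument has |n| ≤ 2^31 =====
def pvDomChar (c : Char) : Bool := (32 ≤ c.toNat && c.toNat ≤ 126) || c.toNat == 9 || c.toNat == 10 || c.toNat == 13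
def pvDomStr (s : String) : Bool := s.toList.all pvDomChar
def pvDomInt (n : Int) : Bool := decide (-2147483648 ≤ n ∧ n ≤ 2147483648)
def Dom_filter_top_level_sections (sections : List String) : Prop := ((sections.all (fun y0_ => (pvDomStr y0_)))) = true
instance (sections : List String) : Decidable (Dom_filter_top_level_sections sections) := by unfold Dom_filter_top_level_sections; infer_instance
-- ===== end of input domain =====

-- B replaces A's quadratic compare-each-section-with-every-earlier-one scan by a set of the
-- input built once plus a per-section check of its dotted prefixes (its possible ancestors).

-- ===== PORT A =====
def is_descendant (sec potential_parent : String) : Bool :=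
  if sec.toList = [] || potential_parent.toList = [] then false
  else if (PySem.Chars.splitOn sec.toList ['.']).length ≤ (PySem.Chars.splitOn potential_parent.toList ['.']).length then false
  else PySem.Chars.startswith sec.toList (potential_parent.toList ++ ['.'])

def filter_top_level_sections (sections : List String) : List String :=
  let sorted_sections := PySem.List.sorted sections (fun x => x) false
  (PySem.List.enumerate sorted_sections).foldl
    (fun top_level_sections p =>
      if !((sorted_sections.take p.1.toNat).any (fun q => is_descendant p.2 q))
      then top_level_sections ++ [p.2] else top_level_sections) []

-- ===== PORT B =====
def filter_top_level_sections_alt (sections : List String) : List String :=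
  let present := PySem.Set.ofList sections
  (PySem.List.sorted sections (fun x => x) false).foldl
    (fun result s =>
      let cs := s.toList
      let has_parent := (PySem.List.pyRange 1 (cs.length : Int) 1).any
        (fun i => (PySem.List.pyGet? cs i == some '.')
                  && present.contains (String.ofList (PySem.List.slice cs none (some i))))
      if has_parent then result else result ++ [s]) []

-- ===== PRECONDITION & SPEC =====
def Spec_filter_top_level_sections (sections : List String) (out : List String) : Prop := out = filter_top_level_sections_alt sections
instance (sections : List String) (out : List String) : Decidable (Spec_filter_top_level_sections sections out) := by unfold Spec_filter_top_level_sections; infer_instance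

-- ===== CLAIM (what is proved, stated in full; the proofs are below) =====
def Claim_equal_filter_top_level_sections : Prop := ∀ (sections : List String), Dom_filter_top_level_sections sections → Spec_filter_top_level_sections sections (filter_top_level_sections sections)

-- ===== LEMMAS AND PROOFS =====

-- B's per-element test, as a predicate of the underlying sections list
def hasParent (sections : List String) (s : String) : Bool :=
  (PySem.List.pyRange 1 (s.toList.length : Int) 1).any
    (fun i => (PySem.List.pyGet? s.toList i == some '.')
              && (PySem.Set.ofList sections).contains (String.ofList (PySem.List.slice s.toList none (some i))))

-- A's loop, as structural recursion over the sorted list carrying the already-seen prefix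
def scanA : List String → List String → List String
  | _, [] => []
  | done, s :: rest =>
      if done.any (fun q => is_descendant s q) then scanA (done ++ [s]) rest
      else s :: scanA (done ++ [s]) rest

theorem splitOn_go_len (fuel : Nat) : ∀ (l cur : List Char) (acc : List (List Char)),
    l.length < fuel →
    (PySem.Chars.splitOn.go ['.'] fuel l cur acc).length = acc.length + 1 + l.count '.' := by
  induction fuel with
  | zero => intro l cur acc h; omega
  | succ n ih =>
    intro l cur acc h
    cases l with
    | nil => simp [PySem.Chars.splitOn.go]
    | cons c rest =>
      by_cases hc : c = '.'
      · subst hc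
        simp only [PySem.Chars.splitOn.go, List.isPrefixOf, beq_self_eq_true, Bool.true_and, if_true]
        rw [ih]
        · simp; ring
        · simp at h ⊢; omega
      · simp only [PySem.Chars.splitOn.go]
        rw [if_neg, ih]
        · simp [hc]
        · simp at h ⊢; omega
        · simp [List.isPrefixOf]; exact fun hh => hc hh.symm

theorem splitOn_len (cs : List Char) :
    (PySem.Chars.splitOn cs ['.']).length = cs.count '.' + 1 := by
  unfold PySem.Chars.splitOn
  rw [splitOn_go_len]
  · simp; omega
  · omega

-- the split-length guard in is_descendant is implied by the startswith test
theorem isDesc_iff (s q : String) :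
    is_descendant s q = true ↔ q.toList ≠ [] ∧ (q.toList ++ ['.']) <+: s.toList := by
  unfold is_descendant
  constructor
  · intro h
    split_ifs at h with h1 h2
    · simp only [Bool.or_eq_true, decide_eq_true_eq, not_or] at h1
      exact ⟨h1.2, (PySem.Chars.startswith_iff _ _).mp h⟩
  · rintro ⟨hq, hpre⟩
    obtain ⟨t, ht⟩ := hpre
    have hs : s.toList ≠ [] := by
      intro h0; rw [h0] at ht; simp at ht
    rw [if_neg (by simp [hs, hq]), if_neg]
    · exact (PySem.Chars.startswith_iff _ _).mpr ⟨t, ht⟩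
    · rw [splitOn_len, splitOn_len, ← ht]
      simp [List.count_append]

-- a proper prefix is lexicographically smaller
theorem lex_of_append_ne_nil (l t : List Char) (ht : t ≠ []) : l < l ++ t := by
  induction l with
  | nil => cases t with | nil => exact absurd rfl ht | cons a t' => exact List.Lex.nil
  | cons c l ih => exact List.Lex.cons ih

-- the pointwise bridge: against a sorted context, "descendant of some earlier element"
-- equals "some dotted prefix of the section is present in the input"
theorem pointwise (sections done rest : List String) (s : String)
    (hsort : (done ++ s :: rest).Pairwise (· ≤ ·))
    (hmem : ∀ x, x ∈ done ++ s :: rest ↔ x ∈ sections) :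
    done.any (fun q => is_descendant s q) = hasParent sections s := by
  rw [Bool.eq_iff_iff]
  unfold hasParent
  simp only [List.any_eq_true]
  constructor
  · rintro ⟨q, hqd, hdesc⟩
    obtain ⟨hqne, t, ht⟩ := (isDesc_iff s q).mp hdesc
    rw [List.append_assoc, List.singleton_append] at ht
    refine ⟨(q.toList.length : Int), ?_, ?_⟩
    · rw [PySem.List.mem_pyRange_one]
      have h1 : 1 ≤ q.toList.length := List.length_pos_iff.mpr hqne
      have h2 : q.toList.length < s.toList.length := by
        rw [← ht]; simp
      omega
    · rw [Bool.and_eq_true, beq_iff_eq]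
      constructor
      · rw [PySem.List.pyGet?_natCast, ← ht, List.getElem?_append_right (le_refl _)]
        simp
      · rw [PySem.List.slice_to _ (by positivity), Int.toNat_natCast, ← ht, List.take_left]
        rw [PySem.Set.contains_iff, PySem.Set.mem_ofList, String.ofList_toList]
        exact (hmem q).mp (List.mem_append_left _ hqd)
  · rintro ⟨i, hi, hcond⟩
    rw [PySem.List.mem_pyRange_one] at hi
    obtain ⟨k, rfl⟩ : ∃ k : Nat, i = (k : Int) := ⟨i.toNat, by omega⟩
    have hk1 : 1 ≤ k := by exact_mod_cast hi.1
    have hkn : k < s.toList.length := by exact_mod_cast hi.2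
    rw [Bool.and_eq_true, beq_iff_eq, PySem.List.pyGet?_natCast,
      PySem.List.slice_to _ (by positivity), Int.toNat_natCast,
      PySem.Set.contains_iff, PySem.Set.mem_ofList] at hcond
    obtain ⟨hget, hmem'⟩ := hcond
    have hqt : (String.ofList (s.toList.take k)).toList = s.toList.take k := String.toList_ofList
    have hplen : (s.toList.take k).length = k := by rw [List.length_take]; omega
    have hpne : s.toList.take k ≠ [] := by intro h0; rw [h0] at hplen; simp at hplen; omega
    have hpre : (s.toList.take k ++ ['.']) <+: s.toList := by
      refine ⟨s.toList.drop (k + 1), ?_⟩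
      rw [List.append_assoc, List.singleton_append]
      have := List.getElem_cons_drop hkn
      rw [List.getElem?_eq_getElem hkn] at hget
      simp only [Option.some_inj] at hget
      rw [hget] at this
      rw [this]
      exact (List.take_append_drop k s.toList)
    have hdesc : is_descendant s (String.ofList (s.toList.take k)) = true :=
      (isDesc_iff _ _).mpr ⟨by rw [hqt]; exact hpne, by rw [hqt]; exact hpre⟩
    have hqlt : String.ofList (s.toList.take k) < s := by
      rw [String.lt_iff_toList_lt, hqt]
      obtain ⟨t, ht⟩ := hpre
      have hlt := lex_of_append_ne_nil (List.take k s.toList) (['.'] ++ t) (by simp)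
      rwa [← List.append_assoc, ht] at hlt
    have hqin : String.ofList (s.toList.take k) ∈ done ++ s :: rest := (hmem _).mpr hmem'
    rcases List.mem_append.mp hqin with hqd | hqsr
    · exact ⟨_, hqd, hdesc⟩
    · exfalso
      rcases List.mem_cons.mp hqsr with heq | hqr
      · rw [heq] at hqlt; exact lt_irrefl s hqlt
      · have := ((List.pairwise_append.mp hsort).2.1)
        have hle : s ≤ String.ofList (s.toList.take k) := (List.pairwise_cons.mp this).1 _ hqr
        exact absurd hqlt (not_lt.mpr hle)

theorem scanA_eq_filter (sections : List String) : ∀ (rest done : List String),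
    (done ++ rest).Pairwise (· ≤ ·) →
    (∀ x, x ∈ done ++ rest ↔ x ∈ sections) →
    scanA done rest = rest.filter (fun s => !hasParent sections s) := by
  intro rest
  induction rest with
  | nil => intro done _ _; simp [scanA]
  | cons s rest ih =>
    intro done hsort hmem
    have hpt := pointwise sections done rest s hsort hmem
    have hrec := ih (done ++ [s])
      (by simpa [List.append_assoc] using hsort)
      (by intro x; simpa [List.append_assoc] using hmem x)
    have h5 : scanA done (s :: rest)
        = if done.any (fun q => is_descendant s q) then scanA (done ++ [s]) rest
          else s :: scanA (done ++ [s]) rest := rfl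
    rw [h5, hpt]
    by_cases hp : hasParent sections s
    · simp [hp, hrec]
    · simp [hp, hrec]

theorem foldA_eq (L : List String) : ∀ (rest done acc : List String), L = done ++ rest →
    (PySem.List.enumerate rest (done.length : Int)).foldl
      (fun top_level_sections p =>
        if !((L.take p.1.toNat).any (fun q => is_descendant p.2 q))
        then top_level_sections ++ [p.2] else top_level_sections) acc
    = acc ++ scanA done rest := by
  intro rest
  induction rest with
  | nil => intro done acc h; simp [scanA, PySem.List.enumerate]
  | cons s rest ih =>
    intro done acc h
    rw [PySem.List.enumerate_cons, List.foldl_cons]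
    have h1 : ((done.length : Int)).toNat = done.length := Int.toNat_natCast _
    have h2 : L.take done.length = done := by rw [h, List.take_left]
    have h3 : (done.length : Int) + 1 = (((done ++ [s]).length : Nat) : Int) := by simp
    have h4 : L = (done ++ [s]) ++ rest := by simp [h]
    simp only [h1, h2]
    rw [h3, ih (done ++ [s]) _ h4]
    have h5 : scanA done (s :: rest)
        = if done.any (fun q => is_descendant s q) then scanA (done ++ [s]) rest
          else s :: scanA (done ++ [s]) rest := rfl
    rw [h5]
    by_cases hc : done.any (fun q => is_descendant s q)
    · simp [hc]
    · simp [hc]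

theorem foldB_eq (p : String → Bool) : ∀ (l acc : List String),
    l.foldl (fun res s => if p s then res else res ++ [s]) acc = acc ++ l.filter (fun s => !p s) := by
  intro l
  induction l with
  | nil => intro acc; simp
  | cons s l ih =>
    intro acc
    rw [List.foldl_cons]
    by_cases hp : p s
    · simp [hp, ih]
    · simp [hp, ih]

-- ===== VERDICT (by name: the statement is the Claim_ definition above) =====
theorem filter_top_level_sections_spec : Claim_equal_filter_top_level_sections := by
  intro sections _
  unfold Spec_filter_top_level_sections
  have hA : filter_top_level_sections sections
      = scanA [] (PySem.List.sorted sections (fun x => x) false) := by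
    unfold filter_top_level_sections
    have := foldA_eq (PySem.List.sorted sections (fun x => x) false)
      (PySem.List.sorted sections (fun x => x) false) [] [] rfl
    simpa using this
  have hB : filter_top_level_sections_alt sections
      = (PySem.List.sorted sections (fun x => x) false).filter (fun s => !hasParent sections s) := by
    show (PySem.List.sorted sections (fun x => x) false).foldl
      (fun res s => if hasParent sections s then res else res ++ [s]) [] = _
    rw [foldB_eq]
    simp
  rw [hA, hB]
  exact scanA_eq_filter sections (PySem.List.sorted sections (fun x => x) false) []
    (by simpa using PySem.List.sorted_pairwise sections (fun x => x))
    (fun x => by simp [PySem.List.mem_sorted])
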